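-- pv_equiv track=rewrite | github.com/Stas123123w4rw45/subtitle | bot.py | _parse_transcript_for_tokens
-- ===== SOURCE A (Python) =====
-- def _parse_transcript_for_tokens(raw_text):
--     tokens = []
--     manual_starts = set()
--     i = 0
--     n = len(raw_text)
--     next_is_line_start = False
--     while i < n:
--         ch = raw_text[i]
--         if ch.isspace():
--             j = i
--             while j < n and raw_text[j].isspace(): j += 1
--             if '  ' in raw_text[i:j] or '\n' in raw_text[i:j]:
--                 next_is_line_start = True
--             i = j
--             continue
--         j = i
--         while j < n and (not raw_text[j].isspace()): j += 1
--         word = raw_text[i:j]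
--         if word:
--             tokens.append(word)
--             if next_is_line_start:
--                 manual_starts.add(len(tokens)-1)
--                 next_is_line_start = False
--         i = j
--     return tokens, manual_starts
-- ===== SOURCE B (Python) =====
-- def _parse_transcript_for_tokens(raw_text):
--     # Single-pass character state machine: builds the current word incrementally and
--     # detects the "line start" marker ('\n' or two adjacent spaces) per character,
--     # instead of A's two-pointer run scanning with substring searches.
--     tokens = []
--     manual_starts = set()
--     pending = False
--     cur = ""
--     prev = ""
--     for ch in raw_text:
--         if ch.isspace():
--             if cur:
--                 tokens.append(cur)
--                 if pending:
--                     manual_starts.add(len(tokens) - 1)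
--                     pending = False
--                 cur = ""
--             if ch == '\n' or (ch == ' ' and prev == ' '):
--                 pending = True
--         else:
--             cur += ch
--         prev = ch
--     if cur:
--         tokens.append(cur)
--         if pending:
--             manual_starts.add(len(tokens) - 1)
--     return tokens, manual_starts
-- ===== Notes on version B (the rewrite author's own statement) =====
-- stated objective: simpler
-- what changed: A's manual two-pointer scan with nested inner while-loops and substring searches (' ' in run, '\n' in run) over each whitespace run is replaced by a single-pass per-character state machine that builds the current word incrementally and detects the line-start marker from the current and previous character.
import Mathlib
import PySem

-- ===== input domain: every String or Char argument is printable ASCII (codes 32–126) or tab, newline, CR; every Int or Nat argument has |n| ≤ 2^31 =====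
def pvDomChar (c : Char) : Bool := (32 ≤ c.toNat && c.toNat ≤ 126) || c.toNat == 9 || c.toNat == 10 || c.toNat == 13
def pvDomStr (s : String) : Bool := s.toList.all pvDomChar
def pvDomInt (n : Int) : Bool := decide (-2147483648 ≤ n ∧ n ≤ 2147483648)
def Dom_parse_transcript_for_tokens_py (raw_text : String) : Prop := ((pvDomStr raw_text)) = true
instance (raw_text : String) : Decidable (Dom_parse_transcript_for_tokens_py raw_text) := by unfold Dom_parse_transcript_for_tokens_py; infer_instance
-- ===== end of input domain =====

-- B replaces A's two-pointer run scanning (inner while loops + substring searches on each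
-- whitespace run) by a single-pass per-character state machine; objective: simpler, same cost.

-- ===== PORT A =====
-- inner `while j < n and raw_text[j].isspace(): j += 1`
def pvScanWs (cs : List Char) (n j : Nat) : Nat :=
  if h : j < n ∧ PySem.Chars.isspace (cs.getD j ' ') = true then pvScanWs cs n (j+1) else j
termination_by n - j
decreasing_by omega

-- inner `while j < n and (not raw_text[j].isspace()): j += 1`
def pvScanWord (cs : List Char) (n j : Nat) : Nat :=
  if h : j < n ∧ ¬ (PySem.Chars.isspace (cs.getD j ' ') = true) then pvScanWord cs n (j+1) else j
termination_by n - j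
decreasing_by omega

theorem pvScanWs_gt (cs : List Char) (n j : Nat) (h : j < n)
    (hs : PySem.Chars.isspace (cs.getD j ' ') = true) : j < pvScanWs cs n j := by
  have hle : ∀ k, k ≤ pvScanWs cs n k := by
    intro k
    induction k using pvScanWs.induct cs n with
    | case1 k h ih => rw [pvScanWs, dif_pos h]; omega
    | case2 k h => rw [pvScanWs, dif_neg h]
  rw [pvScanWs, dif_pos ⟨h, hs⟩]
  have := hle (j+1); omega

theorem pvScanWord_gt (cs : List Char) (n j : Nat) (h : j < n)
    (hs : ¬ PySem.Chars.isspace (cs.getD j ' ') = true) : j < pvScanWord cs n j := by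
  have hle : ∀ k, k ≤ pvScanWord cs n k := by
    intro k
    induction k using pvScanWord.induct cs n with
    | case1 k h ih => rw [pvScanWord, dif_pos h]; omega
    | case2 k h => rw [pvScanWord, dif_neg h]
  rw [pvScanWord, dif_pos ⟨h, hs⟩]
  have := hle (j+1); omega

-- the outer `while i < n` loop, state (tokens, manual_starts, next_is_line_start)
def pvALoop (cs : List Char) (n i : Nat) (tokens : List String) (ms : PySem.Set Int)
    (flag : Bool) : List String × List Int :=
  if h : i < n then
    if hs : PySem.Chars.isspace (cs.getD i ' ') = true then
      pvALoop cs n (pvScanWs cs n i) tokens ms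
        (if PySem.Chars.isIn [' ', ' '] (PySem.List.slice cs (some (i : Int)) (some ((pvScanWs cs n i : Nat) : Int)))
              || PySem.Chars.isIn ['\n'] (PySem.List.slice cs (some (i : Int)) (some ((pvScanWs cs n i : Nat) : Int)))
          then true else flag)
    else
      if (PySem.List.slice cs (some (i : Int)) (some ((pvScanWord cs n i : Nat) : Int))).length != 0 then
        if flag then
          pvALoop cs n (pvScanWord cs n i)
            (tokens ++ [String.ofList (PySem.List.slice cs (some (i : Int)) (some ((pvScanWord cs n i : Nat) : Int)))])
            (PySem.Set.add ms (((tokens ++ [String.ofList (PySem.List.slice cs (some (i : Int)) (some ((pvScanWord cs n i : Nat) : Int)))]).length : Int) - 1)) false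
        else
          pvALoop cs n (pvScanWord cs n i)
            (tokens ++ [String.ofList (PySem.List.slice cs (some (i : Int)) (some ((pvScanWord cs n i : Nat) : Int)))]) ms flag
      else pvALoop cs n (pvScanWord cs n i) tokens ms flag
  else (tokens, ms)
termination_by n - i
decreasing_by
  · have := pvScanWs_gt cs n i h hs; omega
  · have := pvScanWord_gt cs n i h hs; omega
  · have := pvScanWord_gt cs n i h hs; omega
  · have := pvScanWord_gt cs n i h hs; omega

def parse_transcript_for_tokens_py (raw_text : String) : List String × List Int :=
  pvALoop raw_text.toList raw_text.toList.length 0 [] PySem.Set.empty false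

-- ===== PORT B =====
-- one step of B's character state machine; state = (tokens, manual_starts, pending, cur, prev)
def pvBStep (st : List String × List Int × Bool × List Char × List Char) (ch : Char) :
    List String × List Int × Bool × List Char × List Char :=
  let (tokens, ms, pending, cur, prev) := st
  if PySem.Chars.isspace ch = true then
    let st2 :=
      if cur.length != 0 then
        let tokens' := tokens ++ [String.ofList cur]
        if pending then (tokens', PySem.Set.add ms ((tokens'.length : Int) - 1), false, ([] : List Char))
        else (tokens', ms, pending, ([] : List Char))
      else (tokens, ms, pending, cur)
    let pending' := if ch == '\n' || (ch == ' ' && prev == [' ']) then true else st2.2.2.1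
    (st2.1, st2.2.1, pending', st2.2.2.2, [ch])
  else
    (tokens, ms, pending, cur ++ [ch], [ch])

-- the final `if cur:` flush after the loop
def pvBFinish (st : List String × List Int × Bool × List Char × List Char) :
    List String × List Int :=
  let (tokens, ms, pending, cur, _) := st
  if cur.length != 0 then
    let tokens' := tokens ++ [String.ofList cur]
    if pending then (tokens', PySem.Set.add ms ((tokens'.length : Int) - 1)) else (tokens', ms)
  else (tokens, ms)

def parse_transcript_for_tokens_py_alt (raw_text : String) : List String × List Int :=
  pvBFinish (raw_text.toList.foldl pvBStep ([], PySem.Set.empty, false, [], []))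

-- ===== PRECONDITION & SPEC =====
def Spec_parse_transcript_for_tokens_py (raw_text : String) (out : List String × List Int) : Prop := out = parse_transcript_for_tokens_py_alt raw_text
instance (raw_text : String) (out : List String × List Int) : Decidable (Spec_parse_transcript_for_tokens_py raw_text out) := by unfold Spec_parse_transcript_for_tokens_py; infer_instance

-- ===== CLAIM (what is proved, stated in full; the proofs are below) =====
def Claim_equal_parse_transcript_for_tokens_py : Prop := ∀ (raw_text : String), Dom_parse_transcript_for_tokens_py raw_text → Spec_parse_transcript_for_tokens_py raw_text (parse_transcript_for_tokens_py raw_text)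

-- ===== LEMMAS AND PROOFS =====

-- common reference recursion: process the text a maximal run at a time
def pvRuns : List Char → List String → List Int → Bool → List String × List Int
  | [], t, m, _ => (t, m)
  | c :: s, t, m, f =>
    if hs : PySem.Chars.isspace c = true then
      pvRuns (List.dropWhile (fun x => PySem.Chars.isspace x) (c :: s)) t m
        (if PySem.Chars.isIn [' ', ' '] (List.takeWhile (fun x => PySem.Chars.isspace x) (c :: s))
              || PySem.Chars.isIn ['\n'] (List.takeWhile (fun x => PySem.Chars.isspace x) (c :: s))
          then true else f)
    else
      pvRuns (List.dropWhile (fun x => !PySem.Chars.isspace x) (c :: s))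
        (t ++ [String.ofList (List.takeWhile (fun x => !PySem.Chars.isspace x) (c :: s))])
        (if f then PySem.Set.add m (((t ++ [String.ofList (List.takeWhile (fun x => !PySem.Chars.isspace x) (c :: s))]).length : Int) - 1) else m)
        (if f then false else f)
termination_by s => s.length
decreasing_by
  · simp only [List.dropWhile_cons, hs, if_pos]
    have := List.length_dropWhile_le (fun x => PySem.Chars.isspace x) s
    simp only [List.length_cons]; omega
  · have hs' : (fun x => !PySem.Chars.isspace x) c = true := by simp [hs]
    simp only [List.dropWhile_cons, hs', if_pos]
    have := List.length_dropWhile_le (fun x => !PySem.Chars.isspace x) s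
    simp only [List.length_cons]; omega

theorem pv_takeWhile_take {α : Type} (p : α → Bool) (l : List α) :
    l.take (l.takeWhile p).length = l.takeWhile p := by
  induction l with
  | nil => simp
  | cons a l ih =>
    by_cases h : p a = true
    · simp [List.takeWhile_cons, h, ih]
    · simp [List.takeWhile_cons, h]

theorem pv_dropWhile_drop {α : Type} (p : α → Bool) (l : List α) :
    l.drop (l.takeWhile p).length = l.dropWhile p := by
  induction l with
  | nil => simp
  | cons a l ih =>
    by_cases h : p a = true
    · simp [List.takeWhile_cons, List.dropWhile_cons, h, ih]
    · simp [List.takeWhile_cons, List.dropWhile_cons, h]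

theorem pvScanWs_eq (cs : List Char) (j : Nat) :
    pvScanWs cs cs.length j
      = j + ((cs.drop j).takeWhile (fun x => PySem.Chars.isspace x)).length := by
  induction j using pvScanWs.induct cs cs.length with
  | case1 j h ih =>
    have hj : j < cs.length := h.1
    have hd : cs.drop j = cs[j] :: cs.drop (j+1) := List.drop_eq_getElem_cons hj
    have hg : cs.getD j ' ' = cs[j] := by
      simp [List.getD_eq_getElem?_getD, List.getElem?_eq_getElem hj]
    have hsp : PySem.Chars.isspace cs[j] = true := by rw [← hg]; exact h.2
    rw [pvScanWs, dif_pos h, ih, hd, List.takeWhile_cons, hsp]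
    simp; omega
  | case2 j h =>
    rw [pvScanWs, dif_neg h]
    by_cases hj : j < cs.length
    · have hd : cs.drop j = cs[j] :: cs.drop (j+1) := List.drop_eq_getElem_cons hj
      have hg : cs.getD j ' ' = cs[j] := by
        simp [List.getD_eq_getElem?_getD, List.getElem?_eq_getElem hj]
      have hsp : ¬ PySem.Chars.isspace cs[j] = true := by
        rw [← hg]; intro hc; exact h ⟨hj, hc⟩
      rw [hd, List.takeWhile_cons]
      simp [hsp]
    · rw [List.drop_eq_nil_of_le (by omega)]; simp

theorem pvScanWord_eq (cs : List Char) (j : Nat) :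
    pvScanWord cs cs.length j
      = j + ((cs.drop j).takeWhile (fun x => !PySem.Chars.isspace x)).length := by
  induction j using pvScanWord.induct cs cs.length with
  | case1 j h ih =>
    have hj : j < cs.length := h.1
    have hd : cs.drop j = cs[j] :: cs.drop (j+1) := List.drop_eq_getElem_cons hj
    have hg : cs.getD j ' ' = cs[j] := by
      simp [List.getD_eq_getElem?_getD, List.getElem?_eq_getElem hj]
    have hsp : (!PySem.Chars.isspace cs[j]) = true := by
      rw [← hg]; simp only [Bool.not_eq_true']
      exact Bool.not_eq_true _ ▸ (by simpa using h.2)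
    rw [pvScanWord, dif_pos h, ih, hd, List.takeWhile_cons, hsp]
    simp; omega
  | case2 j h =>
    rw [pvScanWord, dif_neg h]
    by_cases hj : j < cs.length
    · have hd : cs.drop j = cs[j] :: cs.drop (j+1) := List.drop_eq_getElem_cons hj
      have hg : cs.getD j ' ' = cs[j] := by
        simp [List.getD_eq_getElem?_getD, List.getElem?_eq_getElem hj]
      have hsp : PySem.Chars.isspace cs[j] = true := by
        rw [← hg]; by_contra hc; exact h ⟨hj, hc⟩
      rw [hd, List.takeWhile_cons]
      simp [hsp]
    · rw [List.drop_eq_nil_of_le (by omega)]; simp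

-- A's index loop computes pvRuns of the current suffix
theorem pvALoop_eq_runs (cs : List Char) :
    ∀ k i t m f, cs.length - i ≤ k →
      pvALoop cs cs.length i t m f = pvRuns (cs.drop i) t m f := by
  intro k
  induction k with
  | zero =>
    intro i t m f hk
    have hge : cs.length ≤ i := by omega
    rw [pvALoop, dif_neg (by omega), List.drop_eq_nil_of_le hge, pvRuns]
  | succ k ih =>
    intro i t m f hk
    by_cases hi : i < cs.length
    · have hd : cs.drop i = cs[i] :: cs.drop (i+1) := List.drop_eq_getElem_cons hi
      have hg : cs.getD i ' ' = cs[i] := by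
        simp [List.getD_eq_getElem?_getD, List.getElem?_eq_getElem hi]
      by_cases hs : PySem.Chars.isspace cs[i] = true
      · -- whitespace run
        have hs' : PySem.Chars.isspace (cs.getD i ' ') = true := by rw [hg]; exact hs
        rw [pvALoop, dif_pos hi, dif_pos hs']
        have hscan := pvScanWs_eq cs i
        set L := ((cs.drop i).takeWhile (fun x => PySem.Chars.isspace x)).length with hL
        have hL1 : 1 ≤ L := by
          rw [hL, hd, List.takeWhile_cons, hs]; simp
        have hslice : PySem.List.slice cs (some (i : Int)) (some ((pvScanWs cs cs.length i : Nat) : Int))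
            = (cs.drop i).takeWhile (fun x => PySem.Chars.isspace x) := by
          rw [PySem.List.slice_natCast, hscan]
          have : i + L - i = L := by omega
          rw [this, hL, pv_takeWhile_take]
        have hdropj : cs.drop (pvScanWs cs cs.length i)
            = (cs.drop i).dropWhile (fun x => PySem.Chars.isspace x) := by
          rw [hscan, ← pv_dropWhile_drop (fun x => PySem.Chars.isspace x) (cs.drop i), ← hL,
            List.drop_drop, Nat.add_comm i L]
        rw [ih (pvScanWs cs cs.length i) t m _ (by rw [hscan]; omega)]
        rw [hslice, hdropj]
        -- right side: unfold pvRuns on the cons suffix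
        conv_rhs => rw [hd, pvRuns]
        rw [dif_pos hs]
        rw [← hd]
      · -- word run
        have hs' : ¬ PySem.Chars.isspace (cs.getD i ' ') = true := by rw [hg]; exact hs
        rw [pvALoop, dif_pos hi, dif_neg hs']
        have hscan := pvScanWord_eq cs i
        set L := ((cs.drop i).takeWhile (fun x => !PySem.Chars.isspace x)).length with hL
        have hL1 : 1 ≤ L := by
          rw [hL, hd, List.takeWhile_cons]; simp [hs]
        have hslice : PySem.List.slice cs (some (i : Int)) (some ((pvScanWord cs cs.length i : Nat) : Int))
            = (cs.drop i).takeWhile (fun x => !PySem.Chars.isspace x) := by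
          rw [PySem.List.slice_natCast, hscan]
          have : i + L - i = L := by omega
          rw [this, hL, pv_takeWhile_take]
        have hdropj : cs.drop (pvScanWord cs cs.length i)
            = (cs.drop i).dropWhile (fun x => !PySem.Chars.isspace x) := by
          rw [hscan, ← pv_dropWhile_drop (fun x => !PySem.Chars.isspace x) (cs.drop i), ← hL,
            List.drop_drop, Nat.add_comm i L]
        have hword : (PySem.List.slice cs (some (i : Int)) (some ((pvScanWord cs cs.length i : Nat) : Int))).length ≠ 0 := by
          rw [hslice, ← hL]; omega
        rw [hslice]
        have hne : (((cs.drop i).takeWhile (fun x => !PySem.Chars.isspace x)).length != 0) = true := by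
          simp only [bne_iff_ne, ne_eq]; rw [← hL]; omega
        rw [hne]
        simp only [if_true]
        conv_rhs => rw [hd, pvRuns, dif_neg hs, ← hd]
        by_cases hf : f = true
        · subst hf
          simp only [if_true]
          rw [ih _ _ _ _ (by rw [hscan]; omega), hdropj]
        · have hf' : f = false := by revert hf; cases f <;> simp
          subst hf'
          simp only [if_false, Bool.false_eq_true]
          rw [ih _ _ _ _ (by rw [hscan]; omega), hdropj]
    · rw [pvALoop, dif_neg (by omega), List.drop_eq_nil_of_le (by omega), pvRuns]

-- ---- B side ----

-- the pending flag accumulated by B over a whitespace run, given whether the previous char was ' '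
def pvPend (ps : Bool) : List Char → Bool
  | [] => false
  | c :: r => (c == '\n' || (c == ' ' && ps)) || pvPend (c == ' ') r

def pvLastPrev (p : List Char) (r : List Char) : List Char :=
  match r.getLast? with
  | none => p
  | some c => [c]

theorem pvLastPrev_cons (p : List Char) (c : Char) (r : List Char) :
    pvLastPrev p (c :: r) = pvLastPrev [c] r := by
  cases r with
  | nil => rfl
  | cons a as =>
    rcases h : (a :: as).getLast? with _ | e
    · exact absurd h (by simp)
    · simp [pvLastPrev, List.getLast?_cons_cons, h]

theorem pv_beq_singleton (c : Char) : (([c] : List Char) == [' ']) = (c == ' ') := by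
  by_cases h : c = ' ' <;> simp [h]

-- folding B over a pure-whitespace run from an empty current word
theorem pv_wsFold : ∀ (r : List Char), (∀ c ∈ r, PySem.Chars.isspace c = true) →
    ∀ t m (f : Bool) (p : List Char),
      List.foldl pvBStep (t, m, f, ([] : List Char), p) r
        = (t, m, f || pvPend (p == [' ']) r, [], pvLastPrev p r) := by
  intro r
  induction r with
  | nil => intro _ t m f p; simp [pvPend, pvLastPrev]
  | cons c r ih =>
    intro hall t m f p
    have hc : PySem.Chars.isspace c = true := hall c (by simp)
    have hr : ∀ x ∈ r, PySem.Chars.isspace x = true := fun x hx => hall x (by simp [hx])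
    rw [List.foldl_cons]
    have hstep : pvBStep (t, m, f, ([] : List Char), p) c
        = (t, m, (c == '\n' || (c == ' ' && p == [' '])) || f, ([] : List Char), [c]) := by
      simp only [pvBStep, hc, if_pos, List.length_nil]
      by_cases hcond : (c == '\n' || (c == ' ' && p == [' '])) = true <;> simp [hcond]
    rw [hstep, ih hr]
    rw [pvLastPrev_cons]
    have hacc : (f || pvPend (p == [' ']) (c :: r))
        = (((c == '\n' || (c == ' ' && p == [' '])) || f) || pvPend ([c] == [' ']) r) := by
      rw [pvPend, pv_beq_singleton]
      generalize (c == '\n' || (c == ' ' && p == [' '])) = x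
      generalize pvPend (c == ' ') r = y
      cases f <;> cases x <;> cases y <;> rfl
    rw [hacc]

-- folding B over a pure-word run just extends the current word
theorem pv_wordFold : ∀ (w : List Char), (∀ c ∈ w, PySem.Chars.isspace c = false) →
    ∀ t m (f : Bool) (cur p : List Char),
      List.foldl pvBStep (t, m, f, cur, p) w = (t, m, f, cur ++ w, pvLastPrev p w) := by
  intro w
  induction w with
  | nil => intro _ t m f cur p; simp [pvLastPrev]
  | cons c w ih =>
    intro hall t m f cur p
    have hc : PySem.Chars.isspace c = false := hall c (by simp)
    have hw : ∀ x ∈ w, PySem.Chars.isspace x = false := fun x hx => hall x (by simp [hx])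
    rw [List.foldl_cons]
    have hstep : pvBStep (t, m, f, cur, p) c = (t, m, f, cur ++ [c], [c]) := by
      simp [pvBStep, hc]
    rw [hstep, ih hw, pvLastPrev_cons, List.append_assoc]
    rfl

theorem pv_singleton_prefix (c : Char) (r : List Char) :
    ([c] : List Char) <+: r ↔ r.head? = some c := by
  cases r with
  | nil => simp
  | cons a r => simp [List.cons_prefix_cons, eq_comm]

theorem pvPend_iff : ∀ (r : List Char) (ps : Bool),
    pvPend ps r = true ↔
      ('\n' ∈ r ∨ ([' ', ' '] : List Char) <:+: r ∨ (ps = true ∧ r.head? = some ' ')) := by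
  intro r
  induction r with
  | nil => intro ps; simp [pvPend]
  | cons c r ih =>
    intro ps
    have hpair : (([' ', ' '] : List Char) <:+: (c :: r))
        ↔ ((c = ' ' ∧ r.head? = some ' ') ∨ ([' ', ' '] : List Char) <:+: r) := by
      rw [List.infix_cons_iff]
      constructor
      · rintro (hp | hi)
        · left
          rw [List.cons_prefix_cons] at hp
          exact ⟨hp.1.symm, (pv_singleton_prefix ' ' r).mp hp.2⟩
        · right; exact hi
      · rintro (⟨rfl, hh⟩ | hi)
        · left; rw [List.cons_prefix_cons]
          exact ⟨rfl, (pv_singleton_prefix ' ' r).mpr hh⟩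
        · right; exact hi
    rw [pvPend]
    simp only [Bool.or_eq_true, Bool.and_eq_true, beq_iff_eq, ih, List.mem_cons, hpair]
    by_cases h1 : c = '\n' <;> by_cases h2 : c = ' ' <;> cases ps <;> simp_all <;> tauto

theorem pvPend_false_eq (r : List Char) :
    pvPend false r = (PySem.Chars.isIn [' ', ' '] r || PySem.Chars.isIn ['\n'] r) := by
  rw [Bool.eq_iff_iff]
  rw [pvPend_iff]
  simp only [Bool.or_eq_true, PySem.Chars.isIn_iff_infix, List.singleton_infix_iff]
  constructor
  · rintro (h | h | ⟨h, _⟩)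
    · right; exact h
    · left; exact h
    · cases h
  · rintro (h | h)
    · right; left; exact h
    · left; exact h

-- main B-side lemma: from a flushed state, B computes pvRuns
theorem pv_G : ∀ (k : Nat) (s : List Char), s.length ≤ k →
    ∀ t m (f : Bool) (p : List Char),
      ((∃ c s', s = c :: s' ∧ PySem.Chars.isspace c = true) → p ≠ [' ']) →
      pvBFinish (List.foldl pvBStep (t, m, f, ([] : List Char), p) s) = pvRuns s t m f := by
  intro k
  induction k with
  | zero =>
    intro s hs t m f p _
    have : s = [] := by
      cases s with
      | nil => rfl
      | cons a s => simp at hs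
    subst this
    simp [pvBFinish, pvRuns]
  | succ k ih =>
    intro s hs t m f p hp
    cases s with
    | nil => simp [pvBFinish, pvRuns]
    | cons c s' =>
      by_cases hc : PySem.Chars.isspace c = true
      · -- leading whitespace run
        have hpne : p ≠ [' '] := hp ⟨c, s', rfl, hc⟩
        have hpbeq : (p == [' ']) = false := by
          rw [beq_eq_false_iff_ne]; exact hpne
        set r := List.takeWhile (fun x => PySem.Chars.isspace x) (c :: s') with hr
        set rest := List.dropWhile (fun x => PySem.Chars.isspace x) (c :: s') with hrest
        have hsplit : r ++ rest = c :: s' := List.takeWhile_append_dropWhile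
        have hrall : ∀ x ∈ r, PySem.Chars.isspace x = true := by
          intro x hx
          have := List.mem_takeWhile_imp hx
          simpa using this
        have hrne : r ≠ [] := by
          rw [hr, List.takeWhile_cons, hc]; simp
        have hrlen : 1 ≤ r.length := by
          cases hre : r with
          | nil => exact absurd hre hrne
          | cons a as => simp
        have hrestlen : rest.length ≤ k := by
          have : r.length + rest.length = s'.length + 1 := by
            rw [← List.length_append, hsplit]; simp
          simp only [List.length_cons] at hs
          omega
        have hfold : List.foldl pvBStep (t, m, f, ([] : List Char), p) (c :: s')
            = List.foldl pvBStep (t, m, f || pvPend false r, [], pvLastPrev p r) rest := by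
          rw [← hsplit, List.foldl_append, pv_wsFold r hrall, hpbeq]
        rw [hfold]
        have hresthp : (∃ c2 s2, rest = c2 :: s2 ∧ PySem.Chars.isspace c2 = true)
            → pvLastPrev p r ≠ [' '] := by
          rintro ⟨c2, s2, he, hc2⟩
          exfalso
          have : (fun x => PySem.Chars.isspace x) c2 = false := by
            have := List.head?_dropWhile_not (fun x => PySem.Chars.isspace x) (c :: s')
            rw [← hrest, he] at this
            simpa using this
          simp [hc2] at this
        rw [ih rest hrestlen t m _ _ hresthp]
        -- right side
        conv_rhs => rw [pvRuns]
        rw [dif_pos hc]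
        have hflag : (if PySem.Chars.isIn [' ', ' '] r || PySem.Chars.isIn ['\n'] r then true else f)
            = (f || pvPend false r) := by
          rw [pvPend_false_eq]
          cases h : (PySem.Chars.isIn [' ', ' '] r || PySem.Chars.isIn ['\n'] r) <;> simp [h]
        rw [← hr, ← hrest, hflag]
      · -- leading word
        set w := List.takeWhile (fun x => !PySem.Chars.isspace x) (c :: s') with hw
        set rest := List.dropWhile (fun x => !PySem.Chars.isspace x) (c :: s') with hrest
        have hsplit : w ++ rest = c :: s' := List.takeWhile_append_dropWhile
        have hwall : ∀ x ∈ w, PySem.Chars.isspace x = false := by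
          intro x hx
          have := List.mem_takeWhile_imp hx
          simpa using this
        have hwne : w ≠ [] := by
          rw [hw, List.takeWhile_cons]; simp [hc]
        have hwlen : 1 ≤ w.length := by
          cases hwe : w with
          | nil => exact absurd hwe hwne
          | cons a as => simp
        have hfold : List.foldl pvBStep (t, m, f, ([] : List Char), p) (c :: s')
            = List.foldl pvBStep (t, m, f, w, pvLastPrev p w) rest := by
          rw [← hsplit, List.foldl_append, pv_wordFold w hwall]
          simp
        set t' := t ++ [String.ofList w] with ht'
        set m' := if f then PySem.Set.add m ((t'.length : Int) - 1) else m with hm'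
        conv_rhs => rw [pvRuns]
        rw [dif_neg hc]
        have hff : (if f then false else f) = false := by cases f <;> rfl
        rw [hfold]
        cases hre : rest with
        | nil =>
          rw [List.foldl_nil]
          have hfin : pvBFinish (t, m, f, w, pvLastPrev p w) = (t', m') := by
            rw [pvBFinish]
            have : (w.length != 0) = true := by simpa using hwne
            simp only [this, if_true]
            cases f <;> simp [ht', hm']
          rw [hfin, ← hw, ← ht', ← hm', hff, ← hrest, hre, pvRuns]
        | cons d r2 =>
          have hd : PySem.Chars.isspace d = true := by
            have := List.head?_dropWhile_not (fun x => !PySem.Chars.isspace x) (c :: s')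
            rw [← hrest, hre] at this
            simpa using this
          -- last char of w is not a space
          have hlast : ∃ e, w.getLast? = some e ∧ PySem.Chars.isspace e = false := by
            cases hwe : w with
            | nil => exact absurd hwe hwne
            | cons a as =>
              refine ⟨(a :: as).getLast (by simp), by simp [List.getLast?_eq_some_getLast], ?_⟩
              have hmem : (a :: as).getLast (by simp) ∈ (a :: as) := List.getLast_mem _
              exact hwall _ (by rw [hwe]; exact hmem)
          obtain ⟨e, he, hesp⟩ := hlast
          have hlastw : pvLastPrev p w = [e] := by rw [pvLastPrev, he]
          have hlastbeq : (pvLastPrev p w == [' ']) = false := by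
            rw [hlastw, beq_eq_false_iff_ne]
            intro hcon
            have he' : e = ' ' := by simpa using hcon
            rw [he'] at hesp
            exact absurd hesp (by decide)
          -- step on d flushes the word
          have hstep : pvBStep (t, m, f, w, pvLastPrev p w) d
              = (t', m', (d == '\n'), ([] : List Char), [d]) := by
            rw [pvBStep]
            simp only [hd, if_pos]
            have hwl : (w.length != 0) = true := by simpa using hwne
            simp only [hwl, if_pos, hlastbeq]
            cases f <;> cases hdn : (d == '\n') <;> simp [ht', hm', hdn]
          rw [List.foldl_cons, hstep]
          set ra := List.takeWhile (fun x => PySem.Chars.isspace x) r2 with hra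
          set rb := List.dropWhile (fun x => PySem.Chars.isspace x) r2 with hrb
          have hsplit2 : ra ++ rb = r2 := List.takeWhile_append_dropWhile
          have hraall : ∀ x ∈ ra, PySem.Chars.isspace x = true := by
            intro x hx
            have := List.mem_takeWhile_imp hx
            simpa using this
          have hfold2 : List.foldl pvBStep (t', m', (d == '\n'), ([] : List Char), [d]) r2
              = List.foldl pvBStep
                  (t', m', (d == '\n') || pvPend (d == ' ') ra, [], pvLastPrev [d] ra) rb := by
            rw [← hsplit2, List.foldl_append, pv_wsFold ra hraall, pv_beq_singleton]
          rw [hfold2]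
          have hrbhp : (∃ c2 s2, rb = c2 :: s2 ∧ PySem.Chars.isspace c2 = true)
              → pvLastPrev [d] ra ≠ [' '] := by
            rintro ⟨c2, s2, he, hc2⟩
            exfalso
            have := List.head?_dropWhile_not (fun x => PySem.Chars.isspace x) r2
            rw [← hrb, he] at this
            simp [hc2] at this
          have hrblen : rb.length ≤ k := by
            have h1 : w.length + rest.length = s'.length + 1 := by
              rw [← List.length_append, hsplit]; simp
            have h2 : ra.length + rb.length = r2.length := by
              rw [← List.length_append, hsplit2]
            simp only [List.length_cons] at hs
            rw [hre] at h1
            simp only [List.length_cons] at h1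
            omega
          rw [ih rb hrblen t' m' _ _ hrbhp]
          -- right side: pvRuns rest t' m' false with rest = d :: r2
          rw [← hw, ← hrest, ← ht', ← hm', hff, hre]
          conv_rhs => rw [pvRuns]
          rw [dif_pos hd]
          have htw : List.takeWhile (fun x => PySem.Chars.isspace x) (d :: r2) = d :: ra := by
            rw [List.takeWhile_cons, hd]; simp [← hra]
          have hdw : List.dropWhile (fun x => PySem.Chars.isspace x) (d :: r2) = rb := by
            rw [List.dropWhile_cons, hd]; simp [← hrb]
          rw [htw, hdw]
          have hflag2 : (if PySem.Chars.isIn [' ', ' '] (d :: ra) || PySem.Chars.isIn ['\n'] (d :: ra)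
                    then true else false)
              = ((d == '\n') || pvPend (d == ' ') ra) := by
            have hpp : pvPend false (d :: ra) = ((d == '\n') || pvPend (d == ' ') ra) := by
              rw [pvPend]; simp
            rw [← hpp, pvPend_false_eq]
            cases h : (PySem.Chars.isIn [' ', ' '] (d :: ra) || PySem.Chars.isIn ['\n'] (d :: ra)) <;> simp [h]
          rw [hflag2]

-- ===== VERDICT (by name: the statement is the Claim_ definition above) =====
theorem parse_transcript_for_tokens_py_spec : Claim_equal_parse_transcript_for_tokens_py := by
  intro raw_text _
  unfold Spec_parse_transcript_for_tokens_py
  unfold parse_transcript_for_tokens_py parse_transcript_for_tokens_py_alt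
  rw [pvALoop_eq_runs raw_text.toList raw_text.toList.length 0 [] PySem.Set.empty false (by omega)]
  rw [List.drop_zero]
  rw [← pv_G raw_text.toList.length raw_text.toList (le_refl _) [] PySem.Set.empty false []
        (by rintro ⟨c, s', _, _⟩; simp)]
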